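-- pv_equiv track=rewrite | github.com/ivansafrin/Polycode | Bindings/Scripts/create_lua_library/CppHeaderParser3.py | is_function_pointer_stack
-- ===== SOURCE A (Python) =====
-- def is_function_pointer_stack(stack):
--     """Count how many non-nested paranthesis are in the stack.  Useful for determining if a stack is a function pointer"""
--     paren_depth = 0
--     paren_count = 0
--     star_after_first_paren = False
--     last_e = None
--     for e in stack:
--         if e == "(":
--             paren_depth += 1
--         elif e == ")" and paren_depth > 0:
--             paren_depth -= 1
--             if paren_depth == 0:
--                 paren_count += 1
--         elif e == "*" and last_e == "(" and paren_count == 0 and paren_depth == 1: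
--             star_after_first_paren = True
--         last_e = e
--
--     if star_after_first_paren and paren_count == 2:
--         return True
--     else:
--         return False
-- ===== SOURCE B (Python) =====
-- def _match_from(stack, j):
--     """stack[j:] are the tokens after an '('; return the index just past its
--     matching ')', or None if it never closes (nested groups are skipped by
--     recursing on each inner '(')."""
--     n = len(stack)
--     while j < n:
--         e = stack[j]
--         if e == ")":
--             return j + 1
--         if e == "(":
--             j = _match_from(stack, j + 1)
--             if j is None:
--                 return None
--         else:
--             j += 1
--     return None
--
--
-- def _star_after_first_open(stack):
--     """True iff the token right after the first '(' in the stack is '*'."""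
--     for k, e in enumerate(stack):
--         if e == "(":
--             return k + 1 < len(stack) and stack[k + 1] == "*"
--     return False
--
--
-- def is_function_pointer_stack(stack):
--     """A function-pointer stack has exactly two top-level (...) groups and a
--     '*' right after the first '('.  Groups are consumed whole by a recursive
--     matcher; an unclosed '(' swallows the rest of the stack."""
--     count = 0
--     i = 0
--     n = len(stack)
--     while i < n:
--         if stack[i] == "(":
--             end = _match_from(stack, i + 1)
--             if end is None:
--                 break
--             count += 1
--             i = end
--         else:
--             i += 1
--     return _star_after_first_open(stack) and count == 2
-- ===== Notes on version B (the rewrite author's own statement) =====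
-- stated objective: alternative
-- what changed: Replaces A's single pass with a depth counter, group counter and prev-token star flag by a recursive-descent reading: an outer loop that jumps over whole (...) groups using a recursive matcher (recursion on nesting instead of a depth counter), plus a separate scan for the token after the first '('.
import Mathlib
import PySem

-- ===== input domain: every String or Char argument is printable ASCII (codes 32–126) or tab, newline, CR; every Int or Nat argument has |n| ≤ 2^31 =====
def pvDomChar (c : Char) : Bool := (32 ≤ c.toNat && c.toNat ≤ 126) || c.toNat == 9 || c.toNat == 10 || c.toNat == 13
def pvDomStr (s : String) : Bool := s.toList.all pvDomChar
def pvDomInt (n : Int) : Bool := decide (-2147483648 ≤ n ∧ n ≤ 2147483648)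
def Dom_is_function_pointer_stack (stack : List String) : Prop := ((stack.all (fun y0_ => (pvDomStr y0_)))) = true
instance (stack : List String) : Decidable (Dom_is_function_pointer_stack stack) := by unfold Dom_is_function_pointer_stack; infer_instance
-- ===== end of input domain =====

-- B replaces A's single depth-counter pass by a recursive-descent reading (an outer loop that
-- jumps over whole (...) groups via a recursive matcher, plus a separate star scan); objective: alternative.

-- ===== PORT A =====
-- A's for-loop: state (paren_depth, paren_count, star_after_first_paren), last_e threaded as a parameter
def fpLoopA : List String → Int → Int → Bool → Option String → (Int × Int × Bool)
  | [], d, c, star, _ => (d, c, star)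
  | e :: rest, d, c, star, last =>
    if e = "(" then fpLoopA rest (d + 1) c star (some e)
    else if e = ")" ∧ d > 0 then
      fpLoopA rest (d - 1) (if d - 1 = 0 then c + 1 else c) star (some e)
    else if e = "*" ∧ last = some "(" ∧ c = 0 ∧ d = 1 then
      fpLoopA rest d c true (some e)
    else fpLoopA rest d c star (some e)

def is_function_pointer_stack (stack : List String) : Bool :=
  let r := fpLoopA stack 0 0 false none
  if r.2.2 ∧ r.2.1 = 2 then true else false

-- ===== PORT B =====
-- B's _match_from: l is the list of tokens after an '('; result = the tokens after its matching
-- ')' (none if it never closes).  The subtype carries the length bound that justifies the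
-- nested recursion (Python recurses on each inner '(').
def fpMatchB : (l : List String) → Option {r : List String // r.length < l.length}
  | [] => none
  | e :: rest =>
    if e = ")" then some ⟨rest, by simp⟩
    else if e = "(" then
      match fpMatchB rest with
      | none => none
      | some ⟨r, hr⟩ =>
        match fpMatchB r with
        | none => none
        | some ⟨r2, hr2⟩ => some ⟨r2, by simp only [List.length_cons]; omega⟩
    else
      match fpMatchB rest with
      | none => none
      | some ⟨r, hr⟩ => some ⟨r, by simp only [List.length_cons]; omega⟩
termination_by l => l.length
decreasing_by all_goals (simp only [List.length_cons]; omega)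

-- B's main while-loop: jump over one whole group per '('; an unclosed '(' ends the count (break)
def fpGroupsB : (l : List String) → Int
  | [] => 0
  | e :: rest =>
    if e = "(" then
      match fpMatchB rest with
      | none => 0
      | some ⟨r, hr⟩ => 1 + fpGroupsB r
    else fpGroupsB rest
termination_by l => l.length
decreasing_by all_goals (simp only [List.length_cons]; omega)

-- B's _star_after_first_open: scan to the first '(' and look at the next token
def fpStarB : List String → Bool
  | [] => false
  | e :: rest => if e = "(" then (rest.head? == some "*") else fpStarB rest

def is_function_pointer_stack_alt (stack : List String) : Bool :=
  fpStarB stack && decide (fpGroupsB stack = 2)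

-- ===== PRECONDITION & SPEC =====
def Spec_is_function_pointer_stack (stack : List String) (out : Bool) : Prop := out = is_function_pointer_stack_alt stack
instance (stack : List String) (out : Bool) : Decidable (Spec_is_function_pointer_stack stack out) := by unfold Spec_is_function_pointer_stack; infer_instance

-- ===== CLAIM (what is proved, stated in full; the proofs are below) =====
def Claim_equal_is_function_pointer_stack : Prop := ∀ (stack : List String), Dom_is_function_pointer_stack stack → Spec_is_function_pointer_stack stack (is_function_pointer_stack stack)

-- ===== LEMMAS AND PROOFS =====

-- proof-side projection of A's loop: just (depth, count), star and last dropped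
def fpCountA : List String → Int → Int → Int
  | [], _, c => c
  | e :: rest, d, c =>
    if e = "(" then fpCountA rest (d + 1) c
    else if e = ")" ∧ d > 0 then
      fpCountA rest (d - 1) (if d - 1 = 0 then c + 1 else c)
    else fpCountA rest d c

-- the count component of A's loop ignores star and last
theorem fpLoopA_count (l : List String) : ∀ (d c : Int) (star : Bool) (last : Option String),
    (fpLoopA l d c star last).2.1 = fpCountA l d c := by
  induction l with
  | nil => intro d c star last; simp [fpLoopA, fpCountA]
  | cons e rest ih =>
    intro d c star last
    simp only [fpLoopA, fpCountA]
    split_ifs with h1 h2 h3 <;> simp [ih]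

-- the star flag is monotone
theorem fpLoopA_star_true (l : List String) : ∀ (d c : Int) (last : Option String),
    (fpLoopA l d c true last).2.2 = true := by
  induction l with
  | nil => intro d c last; simp [fpLoopA]
  | cons e rest ih =>
    intro d c last
    simp only [fpLoopA]
    split_ifs <;> exact ih _ _ _

-- branch equations for A's loop
theorem fpLoopA_cons_open (rest : List String) (d c : Int) (star : Bool) (last : Option String) :
    fpLoopA ("(" :: rest) d c star last = fpLoopA rest (d + 1) c star (some "(") := by
  simp [fpLoopA]

theorem fpLoopA_cons_close (rest : List String) (d c : Int) (star : Bool) (last : Option String)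
    (hd : d > 0) :
    fpLoopA (")" :: rest) d c star last
      = fpLoopA rest (d - 1) (if d - 1 = 0 then c + 1 else c) star (some ")") := by
  simp [fpLoopA, hd]

theorem fpLoopA_cons_star_hit (rest : List String) (last : Option String) (star : Bool)
    (hl : last = some "(") :
    fpLoopA ("*" :: rest) 1 0 star last = fpLoopA rest 1 0 true (some "*") := by
  subst hl; simp [fpLoopA]

theorem fpLoopA_cons_other (e : String) (rest : List String) (d c : Int) (star : Bool)
    (last : Option String) (h1 : e ≠ "(")
    (h2 : ¬ (e = ")" ∧ d > 0)) (h3 : ¬ (e = "*" ∧ last = some "(" ∧ c = 0 ∧ d = 1)) :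
    fpLoopA (e :: rest) d c star last = fpLoopA rest d c star (some e) := by
  simp only [fpLoopA, if_neg h1, if_neg h2, if_neg h3]

-- from a "dead" state (a group already closed, depth ≥ 2, or depth 1 with last ≠ "(")
-- the star flag can never be set
theorem fpLoopA_dead (l : List String) : ∀ (d c : Int) (last : Option String), 0 ≤ c →
    (1 ≤ c ∨ 2 ≤ d ∨ (d = 1 ∧ last ≠ some "(")) →
    (fpLoopA l d c false last).2.2 = false := by
  induction l with
  | nil => intro d c last _ _; simp [fpLoopA]
  | cons e rest ih =>
    intro d c last hc0 hdead
    by_cases h1 : e = "("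
    · subst h1
      rw [fpLoopA_cons_open]
      refine ih _ _ _ hc0 ?_
      rcases hdead with h | h | h
      · exact Or.inl h
      · exact Or.inr (Or.inl (by omega))
      · exact Or.inr (Or.inl (by omega))
    · by_cases h2 : e = ")" ∧ d > 0
      · obtain ⟨he, hd⟩ := h2
        subst he
        rw [fpLoopA_cons_close rest d c _ _ hd]
        refine ih _ _ _ (by split_ifs <;> omega) ?_
        by_cases h3 : d - 1 = 0
        · rw [if_pos h3]
          rcases hdead with h | h | h
          · exact Or.inl (by omega)
          · exact absurd h3 (by omega)
          · exact Or.inl (by omega)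
        · rw [if_neg h3]
          rcases hdead with h | h | h
          · exact Or.inl h
          · rcases eq_or_lt_of_le h with h' | h'
            · exact Or.inr (Or.inr ⟨by omega, by simp⟩)
            · exact Or.inr (Or.inl (by omega))
          · exact absurd h.1 (by omega)
      · by_cases h3 : e = "*" ∧ last = some "(" ∧ c = 0 ∧ d = 1
        · exfalso
          obtain ⟨-, hl, hc, hd⟩ := h3
          rcases hdead with h | h | h
          · omega
          · omega
          · exact h.2 hl
        · rw [fpLoopA_cons_other e rest d c _ last h1 h2 h3]
          refine ih _ _ _ hc0 ?_
          rcases hdead with h | h | h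
          · exact Or.inl h
          · exact Or.inr (Or.inl h)
          · exact Or.inr (Or.inr ⟨h.1, fun he => h1 (Option.some.inj he)⟩)

-- after the first "(" (state depth 1, count 0, last = "("), the star flag of A's loop
-- is exactly "the next token is '*'"
theorem fpLoopA_after_paren (rest : List String) :
    (fpLoopA rest 1 0 false (some "(")).2.2 = (rest.head? == some "*") := by
  cases rest with
  | nil => simp [fpLoopA]
  | cons f r =>
    rw [List.head?_cons]
    by_cases hf : f = "("
    · subst hf
      rw [fpLoopA_cons_open, fpLoopA_dead r (1 + 1) 0 _ (by norm_num) (Or.inr (Or.inl (by norm_num)))]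
      decide
    · by_cases hfr : f = ")"
      · subst hfr
        rw [fpLoopA_cons_close r 1 0 _ _ (by norm_num)]
        rw [if_pos (by norm_num), fpLoopA_dead r (1 - 1) (0 + 1) _ (by norm_num) (Or.inl (by norm_num))]
        decide
      · by_cases hfs : f = "*"
        · subst hfs
          rw [fpLoopA_cons_star_hit r _ _ rfl, fpLoopA_star_true]
          decide
        · rw [fpLoopA_cons_other f r 1 0 _ _ hf (by simp [hfr]) (by simp [hfs])]
          rw [fpLoopA_dead r 1 0 _ (by norm_num) (Or.inr (Or.inr ⟨rfl, by simp [hf]⟩))]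
          simp [hfs]

-- from the initial state, A's star flag equals fpStarB
theorem fpLoopA_star (l : List String) : ∀ (last : Option String), last ≠ some "(" →
    (fpLoopA l 0 0 false last).2.2 = fpStarB l := by
  induction l with
  | nil => intro last _; simp [fpLoopA, fpStarB]
  | cons e rest ih =>
    intro last hlast
    simp only [fpLoopA, fpStarB]
    by_cases he : e = "("
    · subst he
      rw [if_pos rfl, if_pos rfl]
      exact fpLoopA_after_paren rest
    · rw [if_neg he, if_neg he]
      rw [if_neg (by rintro ⟨-, h⟩; omega)]
      rw [if_neg (by rintro ⟨-, h, -⟩; exact hlast h)]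
      exact ih (some e) (by simp [he])

-- with depth d ≥ 1, A's count loop consumes exactly the tokens B's matcher skips, without
-- changing the count, then closes one level
theorem fpCountA_match (l : List String) (d c : Int) (hd : 1 ≤ d) :
    fpCountA l d c = (match fpMatchB l with
      | none => c
      | some r => fpCountA r.1 (d - 1) (if d - 1 = 0 then c + 1 else c)) := by
  cases l with
  | nil => simp [fpCountA, fpMatchB]
  | cons e rest =>
    by_cases he : e = ")"
    · subst he
      rw [show fpMatchB (")" :: rest) = some ⟨rest, by simp⟩ from by simp [fpMatchB]]
      simp only [fpCountA]
      rw [if_neg (by decide), if_pos ⟨by simp, by omega⟩]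
    · by_cases ho : e = "("
      · subst ho
        have hm : fpMatchB ("(" :: rest)
            = match fpMatchB rest with
              | none => none
              | some r =>
                match fpMatchB r.1 with
                | none => none
                | some r2 => some ⟨r2.1, by have := r.2; have := r2.2; simp; omega⟩ := by
          rw [fpMatchB]
          rw [if_neg (by decide), if_pos rfl]
          cases fpMatchB rest with
          | none => rfl
          | some r =>
            cases r with
            | mk rv rh =>
              simp only
              cases fpMatchB rv with
              | none => rfl
              | some r2 => rfl
        have h1 : fpCountA ("(" :: rest) d c = fpCountA rest (d + 1) c := by
          simp [fpCountA]
        rw [h1, fpCountA_match rest (d + 1) c (by omega)]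
        rw [hm]
        cases hr : fpMatchB rest with
        | none => rfl
        | some r =>
          simp only
          rw [show d + 1 - 1 = d from by omega, if_neg (by omega)]
          rw [fpCountA_match r.1 d c hd]
          cases hr2 : fpMatchB r.1 with
          | none => rfl
          | some r2 => rfl
      · have hm : fpMatchB (e :: rest)
            = match fpMatchB rest with
              | none => none
              | some r => some ⟨r.1, by have := r.2; simp; omega⟩ := by
          rw [fpMatchB]
          rw [if_neg he, if_neg ho]
          cases fpMatchB rest with
          | none => rfl
          | some r => cases r with | mk rv rh => rfl
        have h1 : fpCountA (e :: rest) d c = fpCountA rest d c := by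
          simp only [fpCountA]
          rw [if_neg ho, if_neg (by rintro ⟨h, -⟩; exact he h)]
        rw [h1, fpCountA_match rest d c hd, hm]
        cases hr : fpMatchB rest with
        | none => rfl
        | some r => rfl
termination_by l.length
decreasing_by
  · simp only [List.length_cons]; omega
  · have := r.2; simp only [List.length_cons]; omega
  · simp only [List.length_cons]; omega

-- at depth 0, A's count is exactly B's recursive-descent group count
theorem fpCountA_groups (l : List String) : ∀ (c : Int), fpCountA l 0 c = c + fpGroupsB l := by
  cases l with
  | nil => intro c; simp [fpCountA, fpGroupsB]
  | cons e rest =>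
    intro c
    by_cases ho : e = "("
    · subst ho
      have h1 : fpCountA ("(" :: rest) 0 c = fpCountA rest 1 c := by
        simp [fpCountA]
      rw [h1, fpCountA_match rest 1 c (by omega)]
      have hg : fpGroupsB ("(" :: rest)
          = match fpMatchB rest with
            | none => 0
            | some r => 1 + fpGroupsB r.1 := by
        rw [fpGroupsB]
        rw [if_pos rfl]
        cases fpMatchB rest with
        | none => rfl
        | some r => cases r with | mk rv rh => rfl
      rw [hg]
      cases hr : fpMatchB rest with
      | none => simp
      | some r =>
        simp only
        rw [show (1 : Int) - 1 = 0 from by omega, if_pos rfl]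
        rw [fpCountA_groups r.1 (c + 1)]
        ring
    · have h1 : fpCountA (e :: rest) 0 c = fpCountA rest 0 c := by
        simp only [fpCountA]
        rw [if_neg ho, if_neg (by rintro ⟨-, h⟩; omega)]
      have hg : fpGroupsB (e :: rest) = fpGroupsB rest := by
        rw [fpGroupsB, if_neg ho]
      rw [h1, hg, fpCountA_groups rest c]
termination_by l.length
decreasing_by
  · have := r.2; simp only [List.length_cons]; omega
  · simp only [List.length_cons]; omega

-- ===== VERDICT (by name: the statement is the Claim_ definition above) =====
theorem is_function_pointer_stack_spec : Claim_equal_is_function_pointer_stack := by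
  intro stack _
  unfold Spec_is_function_pointer_stack is_function_pointer_stack is_function_pointer_stack_alt
  rw [← fpLoopA_star stack none (by simp)]
  have hc : (fpLoopA stack 0 0 false none).2.1 = fpGroupsB stack := by
    rw [fpLoopA_count stack 0 0 false none, fpCountA_groups stack 0]; ring
  rw [← hc]
  cases hstar : (fpLoopA stack 0 0 false none).2.2 <;>
    by_cases hcc : (fpLoopA stack 0 0 false none).2.1 = 2 <;> simp [hstar, hcc]
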